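-- pv_equiv track=rewrite | github.com/eunchae2000/algorithm_test | programmers_book/신고결과받기.py | solution
-- ===== SOURCE A (Python) =====
-- def solution(id_list, report, k):
--     reported_dic = {}
--     result = {}
--
--     for i in report:
--         uid, rid = i.split()
--         if rid not in reported_dic:
--             reported_dic[rid] = set()
--         reported_dic[rid].add(uid)
--
--     for report_list, user_list in reported_dic.items():
--         if len(user_list) >= k:
--             for user in user_list:
--                 if user not in result:
--                     result[user] = 1
--                 else:
--                     result[user] += 1
--
--     answer = []
--     for i in range(len(id_list)):
--         if id_list[i] not in result:
--             answer.append(0)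
--         else:
--             answer.append(result[id_list[i]])
--     return answer
-- ===== SOURCE B (Python) =====
-- def solution(id_list, report, k):
--     reports_by_target = {}
--     for entry in report:
--         reporter, target = entry.split()
--         reports_by_target.setdefault(target, set()).add(reporter)
--     heavy = [reporters for reporters in reports_by_target.values() if len(reporters) >= k]
--     return [sum(1 for reporters in heavy if uid in reporters) for uid in id_list]
-- ===== Notes on version B (the rewrite author's own statement) =====
-- stated objective: alternative
-- what changed: B inverts the aggregation direction: instead of pushing +1 increments into a per-reporter result dict from every over-threshold reported user and then looking ids up, B filters the over-threshold reporter-sets once and answers each id by counting how many of those sets contain it; the result dict disappears.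
import Mathlib
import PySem

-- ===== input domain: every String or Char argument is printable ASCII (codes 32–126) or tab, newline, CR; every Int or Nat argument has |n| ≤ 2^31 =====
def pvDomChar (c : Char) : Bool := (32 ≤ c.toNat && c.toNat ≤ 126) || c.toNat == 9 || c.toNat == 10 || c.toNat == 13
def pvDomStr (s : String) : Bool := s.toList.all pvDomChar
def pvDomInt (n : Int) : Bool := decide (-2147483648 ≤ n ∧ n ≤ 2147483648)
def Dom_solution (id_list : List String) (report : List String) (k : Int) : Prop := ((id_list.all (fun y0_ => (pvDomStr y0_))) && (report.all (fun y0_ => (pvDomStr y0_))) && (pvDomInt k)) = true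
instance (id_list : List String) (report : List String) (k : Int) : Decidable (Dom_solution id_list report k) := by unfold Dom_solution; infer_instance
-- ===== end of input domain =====

-- B inverts the aggregation: it filters the over-threshold reporter-sets once and counts, per id,
-- how many of them contain the id, instead of pushing +1 increments into a per-reporter result dict.


-- ===== PORT A =====
def solution (id_list : List String) (report : List String) (k : Int) : List Int :=
  let reported_dic : PySem.Dict String (PySem.Set String) :=
    report.foldl (fun d i =>
      let parts := PySem.Str.split₀ i
      let uid := parts.getD 0 ""      -- 'uid, rid = i.split()': exact under Pre_ (exactly two tokens)
      let rid := parts.getD 1 ""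
      let d := if d.contains rid then d else d.insert rid PySem.Set.empty
      d.insert rid (PySem.Set.add (d.getD rid PySem.Set.empty) uid)) PySem.Dict.empty
  let result : PySem.Dict String Int :=
    reported_dic.items.foldl (fun res p =>
      if k ≤ (p.2.length : Int) then
        p.2.foldl (fun res user =>
          match res.get? user with
          | none => res.insert user (1 : Int)
          | some v => res.insert user (v + 1)) res
      else res) PySem.Dict.empty
  (PySem.List.pyRange 0 (id_list.length : Int) 1).foldl (fun answer i =>
      match result.get? (PySem.List.pyGetD id_list i "") with   -- i always in range(len(id_list))
      | none => answer ++ [(0 : Int)]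
      | some v => answer ++ [v]) []

-- ===== PORT B =====
def solution_alt (id_list : List String) (report : List String) (k : Int) : List Int :=
  let reports_by_target : PySem.Dict String (PySem.Set String) :=
    report.foldl (fun d entry =>
      let parts := PySem.Str.split₀ entry
      let reporter := parts.getD 0 ""  -- 'reporter, target = entry.split()': exact under Pre_
      let target := parts.getD 1 ""
      let d := d.setdefault target PySem.Set.empty
      d.insert target (PySem.Set.add (d.getD target PySem.Set.empty) reporter)) PySem.Dict.empty
  let heavy := reports_by_target.values.filter (fun s => decide (k ≤ (s.length : Int)))
  id_list.map (fun uid => ((heavy.countP (fun s => PySem.Set.contains s uid) : Nat) : Int))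

-- ===== PRECONDITION & SPEC =====
-- Pre_ excludes exactly the inputs where the Python raises ValueError: a report entry whose
-- whitespace-split is not exactly two tokens makes 'uid, rid = i.split()' fail in both A and B.
def Pre_solution (id_list : List String) (report : List String) (k : Int) : Prop :=
  ∀ r ∈ report, (PySem.Str.split₀ r).length = 2
instance (id_list : List String) (report : List String) (k : Int) : Decidable (Pre_solution id_list report k) := by unfold Pre_solution; infer_instance

def pvWitness_solution : List String × List String × Int :=
  (["muzi", "frodo", "apeach"], ["muzi frodo", "apeach frodo", "muzi frodo"], 2)

def Spec_solution (id_list : List String) (report : List String) (k : Int) (out : List Int) : Prop := out = solution_alt id_list report k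
instance (id_list : List String) (report : List String) (k : Int) (out : List Int) : Decidable (Spec_solution id_list report k out) := by unfold Spec_solution; infer_instance

-- ===== CLAIM (what is proved, stated in full; the proofs are below) =====
def Claim_equal_solution : Prop := ∀ (id_list : List String) (report : List String) (k : Int), Dom_solution id_list report k → Pre_solution id_list report k → Spec_solution id_list report k (solution id_list report k)

-- ===== LEMMAS AND PROOFS =====

-- The grouping fold both ports run over `report` (A's body; B's body is extensionally the same).
def pvGBody (d : PySem.Dict String (PySem.Set String)) (i : String) : PySem.Dict String (PySem.Set String) :=
  let parts := PySem.Str.split₀ i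
  let uid := parts.getD 0 ""
  let rid := parts.getD 1 ""
  let d := if d.contains rid then d else d.insert rid PySem.Set.empty
  d.insert rid (PySem.Set.add (d.getD rid PySem.Set.empty) uid)

def pvG (report : List String) : PySem.Dict String (PySem.Set String) :=
  report.foldl pvGBody PySem.Dict.empty

-- A's inner increment 'result[user] = 1 / result[user] += 1'
def pvPush (res : PySem.Dict String Int) (user : String) : PySem.Dict String Int :=
  match res.get? user with
  | none => res.insert user (1 : Int)
  | some v => res.insert user (v + 1)

def pvOuter (k : Int) (res : PySem.Dict String Int) (p : String × PySem.Set String) : PySem.Dict String Int :=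
  if k ≤ (p.2.length : Int) then p.2.foldl pvPush res else res

lemma pvGBody_eq_setdefault (d : PySem.Dict String (PySem.Set String)) (e : String) :
    (let parts := PySem.Str.split₀ e
     let reporter := parts.getD 0 ""
     let target := parts.getD 1 ""
     let d := d.setdefault target PySem.Set.empty
     d.insert target (PySem.Set.add (d.getD target PySem.Set.empty) reporter)) = pvGBody d e := by
  by_cases h : d.contains ((PySem.Str.split₀ e).getD 1 "") = true
  · simp only [pvGBody, PySem.Dict.setdefault_of_contains _ _ h, if_pos h]
  · have hc : d.contains ((PySem.Str.split₀ e).getD 1 "") = false := by simpa using h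
    simp only [pvGBody, PySem.Dict.setdefault_of_not_contains d _ hc, if_neg h]

lemma solution_alt_eq (id_list report : List String) (k : Int) :
    solution_alt id_list report k =
    id_list.map (fun uid =>
      ((((pvG report).values.filter (fun s => decide (k ≤ (s.length : Int)))).countP
          (fun s => PySem.Set.contains s uid) : Nat) : Int)) := by
  simp only [solution_alt, pvG]
  have hfold : ∀ (rs : List String) (d : PySem.Dict String (PySem.Set String)),
      rs.foldl (fun d entry =>
        let parts := PySem.Str.split₀ entry
        let reporter := parts.getD 0 ""
        let target := parts.getD 1 ""
        let d := d.setdefault target PySem.Set.empty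
        d.insert target (PySem.Set.add (d.getD target PySem.Set.empty) reporter)) d
      = rs.foldl pvGBody d := by
    intro rs d
    exact List.foldl_ext _ pvGBody d (fun a b _ => pvGBody_eq_setdefault a b)
  rw [hfold]

lemma solution_eq (id_list report : List String) (k : Int) :
    solution id_list report k =
    id_list.map (fun uid => ((pvG report).items.foldl (pvOuter k) PySem.Dict.empty).getD uid 0) := by
  simp only [solution, pvG]
  rw [show (fun (d : PySem.Dict String (PySem.Set String)) (i : String) =>
      let parts := PySem.Str.split₀ i
      let uid := parts.getD 0 ""
      let rid := parts.getD 1 ""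
      let d := if d.contains rid then d else d.insert rid PySem.Set.empty
      d.insert rid (PySem.Set.add (d.getD rid PySem.Set.empty) uid)) = pvGBody from rfl]
  rw [show (fun (res : PySem.Dict String Int) (p : String × PySem.Set String) =>
      if k ≤ (p.2.length : Int) then
        p.2.foldl (fun res user =>
          match res.get? user with
          | none => res.insert user (1 : Int)
          | some v => res.insert user (v + 1)) res
      else res) = pvOuter k from rfl]
  set result := (report.foldl pvGBody PySem.Dict.empty).items.foldl (pvOuter k) PySem.Dict.empty with hres
  rw [PySem.List.foldl_pyRange_zero_pyGetD' id_list ""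
      (fun answer x => match result.get? x with
        | none => answer ++ [(0 : Int)]
        | some v => answer ++ [v]) []]
  have hfun : (fun (answer : List Int) (x : String) => match result.get? x with
        | none => answer ++ [(0 : Int)]
        | some v => answer ++ [v]) = (fun answer x => answer ++ [result.getD x 0]) := by
    funext answer x
    cases h : result.get? x with
    | none => simp [PySem.Dict.getD_of_get?_eq_none _ _ h]
    | some v => simp [PySem.Dict.getD_of_get?_eq_some _ _ h]
  rw [hfun, PySem.List.foldl_append_singleton_eq_map, List.nil_append]

-- facts about the grouped dict: duplicate-free value sets
lemma getD_mem_values_or {κ ν : Type} [BEq κ] [LawfulBEq κ] (d : PySem.Dict κ ν) (x : κ) (dflt : ν) :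
    d.getD x dflt = dflt ∨ d.getD x dflt ∈ d.values := by
  cases h : d.get? x with
  | none => left; exact PySem.Dict.getD_of_get?_eq_none _ _ h
  | some v =>
    right
    rw [PySem.Dict.getD_of_get?_eq_some _ _ h]
    have := PySem.Dict.mem_items_of_get?_eq_some _ h
    simp only [PySem.Dict.values]
    exact List.mem_map.mpr ⟨(x, v), this, rfl⟩

lemma pvG_values_nodup (report : List String) (d : PySem.Dict String (PySem.Set String))
    (hd : ∀ s ∈ d.values, s.Nodup) : ∀ s ∈ (report.foldl pvGBody d).values, s.Nodup := by
  induction report generalizing d with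
  | nil => exact hd
  | cons r rs ih =>
    refine ih _ ?_
    intro s hs
    simp only [pvGBody] at hs
    set d' := if d.contains ((PySem.Str.split₀ r).getD 1 "") = true then d
              else d.insert ((PySem.Str.split₀ r).getD 1 "") PySem.Set.empty with hd'
    have hd'vals : ∀ t ∈ d'.values, t.Nodup := by
      intro t ht
      rw [hd'] at ht
      split at ht
      · exact hd t ht
      · rcases PySem.Dict.mem_values_insert _ _ _ _ ht with h | h
        · subst h; exact List.nodup_nil
        · exact hd t h
    rcases PySem.Dict.mem_values_insert _ _ _ _ hs with h | h
    · subst h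
      rcases getD_mem_values_or d' ((PySem.Str.split₀ r).getD 1 "") PySem.Set.empty with he | he
      · rw [he]; exact PySem.Set.nodup_add _ _ List.nodup_nil
      · exact PySem.Set.nodup_add _ _ (hd'vals _ he)
    · exact hd'vals s h

-- the push lemmas: what the increment loops compute
lemma pvPush_getD (res : PySem.Dict String Int) (u x : String) :
    (pvPush res u).getD x 0 = res.getD x 0 + (if x = u then 1 else 0) := by
  simp only [pvPush]
  cases h : res.get? u with
  | none =>
    rw [PySem.Dict.getD_insert]
    split
    · next he => subst he; rw [PySem.Dict.getD_of_get?_eq_none _ _ h]; ring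
    · ring
  | some v =>
    rw [PySem.Dict.getD_insert]
    split
    · next he => subst he; rw [PySem.Dict.getD_of_get?_eq_some _ _ h]
    · ring

lemma pvPushSet (s : PySem.Set String) (res : PySem.Dict String Int) (x : String)
    (hs : s.Nodup) :
    (s.foldl pvPush res).getD x 0 = res.getD x 0 + (if x ∈ s then 1 else 0) := by
  induction s generalizing res with
  | nil => simp
  | cons v vs ih =>
    simp only [List.foldl_cons]
    rw [ih _ (List.Nodup.of_cons hs), pvPush_getD]
    by_cases hxv : x = v
    · subst hxv
      have hnm : x ∉ vs := (List.nodup_cons.mp hs).1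
      simp [hnm]
    · simp [hxv, List.mem_cons]

lemma pvPushAll (k : Int) (L : List (String × PySem.Set String)) (res : PySem.Dict String Int)
    (x : String) (hL : ∀ p ∈ L, p.2.Nodup) :
    (L.foldl (pvOuter k) res).getD x 0 =
    res.getD x 0 + ((L.countP (fun p => decide (k ≤ (p.2.length : Int)) && PySem.Set.contains p.2 x) : Nat) : Int) := by
  induction L generalizing res with
  | nil => simp
  | cons p ps ih =>
    simp only [List.foldl_cons, List.countP_cons]
    rw [ih _ (fun q hq => hL q (List.mem_cons_of_mem _ hq))]
    simp only [pvOuter]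
    by_cases hk : k ≤ (p.2.length : Int)
    · rw [if_pos hk, pvPushSet _ _ _ (hL p List.mem_cons_self)]
      by_cases hm : x ∈ p.2
      · simp [hk, hm]
        ring
      · simp [hk, hm]
    · rw [if_neg hk]
      simp [hk]

-- the B-side count over filtered values equals the same countP over the items
lemma count_values_eq (k : Int) (d : PySem.Dict String (PySem.Set String)) (uid : String) :
    (d.values.filter (fun s => decide (k ≤ (s.length : Int)))).countP
        (fun s => PySem.Set.contains s uid) =
    d.items.countP (fun p => decide (k ≤ (p.2.length : Int)) && PySem.Set.contains p.2 uid) := by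
  rw [List.countP_filter]
  simp only [PySem.Dict.values, List.countP_map]
  refine List.countP_congr (fun p _ => ?_)
  simp only [Function.comp]
  rw [Bool.and_comm]

-- ===== VERDICT (by name: the statement is the Claim_ definition above) =====
theorem solution_spec : Claim_equal_solution := by
  intro id_list report k _hdom _hpre
  unfold Spec_solution
  rw [solution_eq, solution_alt_eq]
  refine List.map_congr_left (fun uid _ => ?_)
  have hvals : ∀ p ∈ (pvG report).items, p.2.Nodup := by
    intro p hp
    refine pvG_values_nodup report PySem.Dict.empty ?_ p.2 ?_
    · intro s hs
      simp [PySem.Dict.values, PySem.Dict.empty] at hs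
    simp only [PySem.Dict.values]
    exact List.mem_map.mpr ⟨p, hp, rfl⟩
  rw [pvPushAll k _ _ _ hvals, count_values_eq]
  simp
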